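-- pv_equiv track=rewrite | github.com/aronboliveira/music-mood-auto-catalog | scripts/apply_filename_sanitisation.py | join_single_char_dots
-- ===== SOURCE A (Python) =====
-- def join_single_char_dots(name: str) -> str:
--     """
--     Collapse runs of 4+ single-char tokens separated by dots, per hyphen-segment.
--     B.R.U.N.O → BRUNO   C.h.u.c.k-B.e.r.r.y → Chuck-Berry
--     MockBand_REM. stays (only 3 chars).
--     """
--     segments = name.split("-")
--     processed = []
--     for segment in segments:
--         tokens = segment.split(".")
--         result_parts: list[str] = []
--         buf: list[str] = []
--
--         def flush_dot_buf():
--             if len(buf) >= 4: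
--                 result_parts.append("".join(buf))
--             elif buf:
--                 result_parts.append(".".join(buf))
--             buf.clear()
--
--         for tok in tokens:
--             if len(tok) == 1 and tok.isalnum():
--                 buf.append(tok)
--             else:
--                 flush_dot_buf()
--                 result_parts.append(tok)
--         flush_dot_buf()
--         processed.append(".".join(result_parts))
--     return "-".join(processed)
-- ===== SOURCE B (Python) =====
-- def join_single_char_dots(name: str) -> str:
--     """Collapse runs of 4+ single-char alnum tokens separated by dots, per hyphen-segment."""
--     def _single(t: str) -> bool:
--         return len(t) == 1 and t.isalnum()
--
--     def _collapse(tokens: list) -> list: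
--         parts = []
--         i = 0
--         n = len(tokens)
--         while i < n:
--             if _single(tokens[i]):
--                 j = i + 1
--                 while j < n and _single(tokens[j]):
--                     j += 1
--                 run = tokens[i:j]
--                 parts.append("".join(run) if j - i >= 4 else ".".join(run))
--                 i = j
--             else:
--                 parts.append(tokens[i])
--                 i += 1
--         return parts
--
--     return "-".join(
--         ".".join(_collapse(seg.split("."))) for seg in name.split("-")
--     )
-- ===== Notes on version B (the rewrite author's own statement) =====
-- stated objective: alternative
-- what changed: Replaces A's per-token state machine with a mutable buffer and flush closure by a two-pointer scan that locates each maximal run of single-char alnum tokens as a slice and emits it in one step.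
import Mathlib
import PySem

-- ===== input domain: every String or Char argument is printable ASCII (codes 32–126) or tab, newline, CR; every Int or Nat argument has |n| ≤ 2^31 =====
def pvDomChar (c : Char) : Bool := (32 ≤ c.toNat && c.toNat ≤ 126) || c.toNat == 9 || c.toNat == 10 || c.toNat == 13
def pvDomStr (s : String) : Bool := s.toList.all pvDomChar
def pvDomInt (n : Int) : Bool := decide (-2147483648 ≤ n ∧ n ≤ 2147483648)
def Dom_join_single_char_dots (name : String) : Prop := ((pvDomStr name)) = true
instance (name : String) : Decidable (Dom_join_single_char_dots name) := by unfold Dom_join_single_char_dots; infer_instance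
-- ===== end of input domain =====

-- B replaces A's buffer/flush state machine with a two-pointer maximal-run scan (alternative, same cost).

-- ===== PORT A =====
-- flush_dot_buf: result of appending the flushed buffer to result_parts
def pvFlushA (parts buf : List String) : List String :=
  if 4 ≤ buf.length then parts ++ [PySem.Str.join "" buf]
  else if buf.isEmpty then parts
  else parts ++ [PySem.Str.join "." buf]

-- one iteration of A's 'for tok in tokens' loop over (result_parts, buf)
def pvStepA (st : List String × List String) (tok : String) : List String × List String :=
  if PySem.Str.len tok == 1 && PySem.Str.strIsalnum tok then (st.1, st.2 ++ [tok])
  else (pvFlushA st.1 st.2 ++ [tok], [])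

def pvSegA (segment : String) : String :=
  let st := ((PySem.Str.split? segment ".").getD []).foldl pvStepA ([], [])
  PySem.Str.join "." (pvFlushA st.1 st.2)

def join_single_char_dots (name : String) : String :=
  PySem.Str.join "-" (((PySem.Str.split? name "-").getD []).map pvSegA)

-- ===== PORT B =====
def pvSingle (t : String) : Bool := PySem.Str.len t == 1 && PySem.Str.strIsalnum t

-- B's two-pointer scan: the inner 'while j < n' run extension is takeWhile/dropWhile
def pvCollapse : List String → List String
  | [] => []
  | t :: ts =>
    if pvSingle t then
      let run := t :: ts.takeWhile pvSingle
      (if 4 ≤ run.length then PySem.Str.join "" run else PySem.Str.join "." run)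
        :: pvCollapse (ts.dropWhile pvSingle)
    else t :: pvCollapse ts
termination_by l => l.length
decreasing_by
  · have := List.length_dropWhile_le pvSingle ts
    simp; omega
  · simp

def join_single_char_dots_alt (name : String) : String :=
  PySem.Str.join "-" (((PySem.Str.split? name "-").getD []).map
    (fun seg => PySem.Str.join "." (pvCollapse ((PySem.Str.split? seg ".").getD []))))

-- ===== PRECONDITION & SPEC =====
def Spec_join_single_char_dots (name : String) (out : String) : Prop := out = join_single_char_dots_alt name
instance (name : String) (out : String) : Decidable (Spec_join_single_char_dots name out) := by unfold Spec_join_single_char_dots; infer_instance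

-- ===== CLAIM (what is proved, stated in full; the proofs are below) =====
def Claim_equal_join_single_char_dots : Prop := ∀ (name : String), Dom_join_single_char_dots name → Spec_join_single_char_dots name (join_single_char_dots name)

-- ===== LEMMAS AND PROOFS =====

-- A's remaining computation from a pending buffer, expressed purely over the token list
def pvAux (tokens : List String) (buf : List String) : List String :=
  match tokens with
  | [] => pvFlushA [] buf
  | t :: ts =>
    if pvSingle t then pvAux ts (buf ++ [t])
    else pvFlushA [] buf ++ t :: pvAux ts []

theorem pvFlushA_eq (parts buf : List String) :
    pvFlushA parts buf = parts ++ pvFlushA [] buf := by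
  unfold pvFlushA; split_ifs <;> simp

theorem pvInv (tokens : List String) :
    ∀ parts buf,
      pvFlushA (tokens.foldl pvStepA (parts, buf)).1 (tokens.foldl pvStepA (parts, buf)).2
        = parts ++ pvAux tokens buf := by
  induction tokens with
  | nil => intro parts buf; simpa [pvAux] using pvFlushA_eq parts buf
  | cons t ts ih =>
    intro parts buf
    by_cases h : pvSingle t = true
    · simp only [List.foldl_cons, pvStepA]
      rw [show (PySem.Str.len t == 1 && PySem.Str.strIsalnum t) = true from h]
      simpa [pvAux, h] using ih parts (buf ++ [t])
    · simp only [List.foldl_cons, pvStepA]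
      rw [show (PySem.Str.len t == 1 && PySem.Str.strIsalnum t) = false from by
        simpa [pvSingle] using h]
      rw [if_neg (by simp : ¬ (false = true))]
      have := ih (pvFlushA parts buf ++ [t]) []
      simp only [this, pvAux, h]
      rw [pvFlushA_eq parts buf]
      simp
  
theorem pvCollapse_split (tokens : List String) :
    pvCollapse tokens
      = pvFlushA [] (tokens.takeWhile pvSingle) ++ pvCollapse (tokens.dropWhile pvSingle) := by
  cases tokens with
  | nil => simp [pvCollapse, pvFlushA]
  | cons t ts =>
    by_cases h : pvSingle t = true
    · rw [pvCollapse]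
      simp only [h, List.takeWhile_cons, List.dropWhile_cons, ite_true]
      unfold pvFlushA
      split_ifs with h4 he
      · simp
      · exact absurd he (by simp)
      · simp
    · simp [pvCollapse, h, pvFlushA]

theorem pvAux_eq (tokens : List String) :
    ∀ buf, pvAux tokens buf
      = pvFlushA [] (buf ++ tokens.takeWhile pvSingle) ++ pvCollapse (tokens.dropWhile pvSingle) := by
  induction tokens with
  | nil => intro buf; simp [pvAux, pvCollapse]
  | cons t ts ih =>
    intro buf
    by_cases h : pvSingle t = true
    · simp only [pvAux, h, ite_true, List.takeWhile_cons, List.dropWhile_cons]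
      rw [ih (buf ++ [t])]
      simp
    · simp only [pvAux, h, List.takeWhile_cons, List.dropWhile_cons, if_neg, Bool.not_eq_true]
      rw [ih []]
      simp only [List.nil_append, List.append_nil]
      rw [← pvCollapse_split ts]
      conv_rhs => rw [pvCollapse]
      simp [h]

theorem pvSeg_eq (seg : String) :
    pvSegA seg = PySem.Str.join "." (pvCollapse ((PySem.Str.split? seg ".").getD [])) := by
  show PySem.Str.join "."
      (pvFlushA (((PySem.Str.split? seg ".").getD []).foldl pvStepA ([], [])).1
        (((PySem.Str.split? seg ".").getD []).foldl pvStepA ([], [])).2)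
    = _
  rw [pvInv ((PySem.Str.split? seg ".").getD []) [] []]
  rw [pvAux_eq ((PySem.Str.split? seg ".").getD []) []]
  simp only [List.nil_append]
  rw [← pvCollapse_split]

-- ===== VERDICT (by name: the statement is the Claim_ definition above) =====
theorem join_single_char_dots_spec : Claim_equal_join_single_char_dots := by
  intro name _
  unfold Spec_join_single_char_dots join_single_char_dots join_single_char_dots_alt
  congr 1
  exact List.map_congr_left (fun seg _ => pvSeg_eq seg)
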